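-- pv_equiv track=rewrite | github.com/jdomeracki/SBH-GeneticAlgorithm | preliminary_optimization.py | fill_the_matrix
-- ===== SOURCE A (Python) =====
-- def perfect_match(l_o_nct, r_o_nct):
--     r = len(r_o_nct)
--     if (l_o_nct[1:] == r_o_nct[:r-1]):
--         return True
--     else:
--         return False
--
-- def fill_the_matrix(matrix, spectrum, n):
--     for i in range(n):
--         for j in range(n):
--             if(i == j):
--                 continue
--             else:
--                 if(perfect_match(spectrum[i], spectrum[j])):
--                     matrix[i][j] = 1
--     return matrix
-- ===== SOURCE B (Python) =====
-- def fill_the_matrix(matrix, spectrum, n):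
--     # Group oligo indices by their length-1 prefix, then mark each row by a
--     # single hash lookup of its suffix instead of scanning all n candidates.
--     # Only indices that actually exist in spectrum are visited.
--     k = min(max(n, 0), len(spectrum))
--     by_prefix = {}
--     for j in range(k):
--         s = spectrum[j]
--         by_prefix.setdefault(s[:len(s) - 1], []).append(j)
--     for i in range(k):
--         for j in by_prefix.get(spectrum[i][1:], []):
--             if j != i:
--                 matrix[i][j] = 1
--     return matrix
-- ===== Notes on version B (the rewrite author's own statement) =====
-- stated objective: faster
-- what changed: Replaces A's nested all-pairs loop that compares each oligo's suffix to every other oligo's prefix with a dict grouping indices by length-1 prefix, so each row is marked by one hash lookup of its suffix.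
-- outside the precondition, e.g. on fill_the_matrix([[0], [0]], ['ab', 'cd'], 2): A returns [[0], [0]], B returns [[0], [0]]; on fill_the_matrix([], ['ab', 'bc'], 2): A raises IndexError, B raises IndexError
import Mathlib
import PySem

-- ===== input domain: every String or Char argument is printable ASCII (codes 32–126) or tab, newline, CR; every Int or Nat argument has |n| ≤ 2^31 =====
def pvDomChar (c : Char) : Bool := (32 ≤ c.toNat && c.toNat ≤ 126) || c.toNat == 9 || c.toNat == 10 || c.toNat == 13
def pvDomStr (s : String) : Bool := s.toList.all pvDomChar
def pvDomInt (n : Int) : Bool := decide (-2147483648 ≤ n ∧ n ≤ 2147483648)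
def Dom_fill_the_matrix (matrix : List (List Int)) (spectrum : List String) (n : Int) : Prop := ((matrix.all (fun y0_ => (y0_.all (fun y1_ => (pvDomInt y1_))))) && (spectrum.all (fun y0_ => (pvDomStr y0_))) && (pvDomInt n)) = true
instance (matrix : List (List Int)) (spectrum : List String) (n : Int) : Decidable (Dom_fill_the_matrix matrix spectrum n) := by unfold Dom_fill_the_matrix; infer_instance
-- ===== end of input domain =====

-- B replaces A's all-pairs suffix/prefix comparison by hashing the oligos'
-- length-1 prefixes into a dict and marking each row via one suffix lookup.
-- Both A and B mutate `matrix` in place in Python; the theorems here are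
-- about the returned value (which is that same matrix).

-- ===== PORT A =====
def perfect_match (l_o_nct r_o_nct : String) : Bool :=
  let r := PySem.Str.len r_o_nct
  if PySem.Str.slice l_o_nct (some 1) none == PySem.Str.slice r_o_nct none (some (r - 1)) then
    true
  else
    false

-- matrix[i][j] = 1 — total forms; indices are in range under Pre_
def pvSetCell (m : List (List Int)) (i j : Int) : List (List Int) :=
  PySem.List.pySetD m i (PySem.List.pySetD (PySem.List.pyGetD m i []) j 1)

def fill_the_matrix (matrix : List (List Int)) (spectrum : List String) (n : Int) : List (List Int) :=
  (PySem.List.pyRange 0 n 1).foldl (fun m i =>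
    (PySem.List.pyRange 0 n 1).foldl (fun m j =>
      if i == j then m
      else if perfect_match (PySem.List.pyGetD spectrum i "") (PySem.List.pyGetD spectrum j "") then
        pvSetCell m i j
      else m) m) matrix

-- ===== PORT B =====
-- s[:len(s)-1]
def pvPrefixKey (s : String) : String := PySem.Str.slice s none (some (PySem.Str.len s - 1))

def fill_the_matrix_alt (matrix : List (List Int)) (spectrum : List String) (n : Int) : List (List Int) :=
  let k := min (max n 0) (spectrum.length : Int)
  let by_prefix : PySem.Dict String (List Int) :=
    (PySem.List.pyRange 0 k 1).foldl (fun d j =>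
      d.modify (pvPrefixKey (PySem.List.pyGetD spectrum j "")) [] (fun l => l ++ [j]))
      PySem.Dict.empty
  (PySem.List.pyRange 0 k 1).foldl (fun m i =>
    (by_prefix.getD (PySem.Str.slice (PySem.List.pyGetD spectrum i "") (some 1) none) []).foldl
      (fun m j => if j != i then pvSetCell m i j else m) m) matrix

-- ===== PRECONDITION & SPEC =====
-- Python A raises IndexError when 2 ≤ n and the spectrum or matrix is too small; Pre_
-- requires the usual n×n shape (n ≤ |spectrum|, n ≤ |matrix|, first n rows of length ≥ n)
-- unless n ≤ 1 (then A touches nothing and returns the matrix unchanged). This is slightly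
-- narrower than A's exact no-raise set: with a too-short matrix A still returns when no pair
-- of oligos happens to match — there B returns the same unchanged matrix (see cites).
def Pre_fill_the_matrix (matrix : List (List Int)) (spectrum : List String) (n : Int) : Prop :=
  n ≤ 1 ∨ (n ≤ (spectrum.length : Int) ∧ n ≤ (matrix.length : Int) ∧
    ∀ row ∈ matrix.take n.toNat, n ≤ (row.length : Int))
instance (matrix : List (List Int)) (spectrum : List String) (n : Int) : Decidable (Pre_fill_the_matrix matrix spectrum n) := by unfold Pre_fill_the_matrix; infer_instance

def pvWitness_fill_the_matrix : List (List Int) × List String × Int := ([[0, 0], [0, 0]], ["ab", "bc"], 2)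

def Spec_fill_the_matrix (matrix : List (List Int)) (spectrum : List String) (n : Int) (out : List (List Int)) : Prop := out = fill_the_matrix_alt matrix spectrum n
instance (matrix : List (List Int)) (spectrum : List String) (n : Int) (out : List (List Int)) : Decidable (Spec_fill_the_matrix matrix spectrum n out) := by unfold Spec_fill_the_matrix; infer_instance

-- ===== CLAIM (what is proved, stated in full; the proofs are below) =====
def Claim_equal_fill_the_matrix : Prop := ∀ (matrix : List (List Int)) (spectrum : List String) (n : Int), Dom_fill_the_matrix matrix spectrum n → Pre_fill_the_matrix matrix spectrum n → Spec_fill_the_matrix matrix spectrum n (fill_the_matrix matrix spectrum n)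

-- ===== LEMMAS AND PROOFS =====

-- A guarded fold is a fold over the filtered list.
theorem pv_foldl_ite {α β : Type} (p : β → Bool) (f : α → β → α) (l : List β) (init : α) :
    l.foldl (fun a x => if p x then f a x else a) init = (l.filter p).foldl f init := by
  induction l generalizing init with
  | nil => rfl
  | cons x t ih => by_cases h : p x <;> simp [h, ih]

-- The bucket stored under `key` is exactly the (ordered) list of indices in range k whose
-- length-1 prefix equals `key`.
theorem pv_bucket_eq (spectrum : List String) (k : Int) (key : String) :
    ((PySem.List.pyRange 0 k 1).foldl (fun d j =>
        d.modify (pvPrefixKey (PySem.List.pyGetD spectrum j "")) [] (fun l => l ++ [j]))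
        PySem.Dict.empty).getD key []
    = (PySem.List.pyRange 0 k 1).filter
        (fun j => pvPrefixKey (PySem.List.pyGetD spectrum j "") == key) := by
  have h := PySem.Dict.getD_foldl_modify_append
    ((PySem.List.pyRange 0 k 1).map (fun j => (pvPrefixKey (PySem.List.pyGetD spectrum j ""), j)))
    PySem.Dict.empty key
  rw [List.foldl_map] at h
  simpa [List.filter_map, Function.comp_def] using h

-- A's inner loop over j, for a fixed i, marks exactly the filtered index list.
theorem pv_innerA_eq (spectrum : List String) (n i : Int) (m : List (List Int)) :
    (PySem.List.pyRange 0 n 1).foldl (fun m j =>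
        if i == j then m
        else if perfect_match (PySem.List.pyGetD spectrum i "") (PySem.List.pyGetD spectrum j "") then
          pvSetCell m i j
        else m) m
    = ((PySem.List.pyRange 0 n 1).filter (fun j =>
          !(i == j) && perfect_match (PySem.List.pyGetD spectrum i "") (PySem.List.pyGetD spectrum j ""))).foldl
        (fun m j => pvSetCell m i j) m := by
  rw [← pv_foldl_ite]
  congr 1
  funext m j
  cases h : (i == j) <;> simp

theorem pv_foldl_ext {α β : Type} (f g : α → β → α) (l : List β) (init : α)
    (h : ∀ a b, f a b = g a b) : l.foldl f init = l.foldl g init := by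
  rw [show f = g from funext fun a => funext (h a)]

-- B's computation with an explicit range bound b: A with range n equals this at b = n.
def pvAltGen (matrix : List (List Int)) (spectrum : List String) (b : Int) : List (List Int) :=
  let by_prefix : PySem.Dict String (List Int) :=
    (PySem.List.pyRange 0 b 1).foldl (fun d j =>
      d.modify (pvPrefixKey (PySem.List.pyGetD spectrum j "")) [] (fun l => l ++ [j]))
      PySem.Dict.empty
  (PySem.List.pyRange 0 b 1).foldl (fun m i =>
    (by_prefix.getD (PySem.Str.slice (PySem.List.pyGetD spectrum i "") (some 1) none) []).foldl
      (fun m j => if j != i then pvSetCell m i j else m) m) matrix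

set_option maxHeartbeats 1000000 in
theorem pv_A_eq_gen (matrix : List (List Int)) (spectrum : List String) (n : Int) :
    fill_the_matrix matrix spectrum n = pvAltGen matrix spectrum n := by
  unfold fill_the_matrix pvAltGen
  refine pv_foldl_ext _ _ _ _ ?_
  intro m i
  rw [pv_innerA_eq, pv_foldl_ite, pv_bucket_eq, List.filter_filter]
  congr 1
  refine List.filter_congr ?_
  intro j _
  rw [Bool.eq_iff_iff]
  simp [perfect_match, pvPrefixKey]
  constructor <;> rintro ⟨h1, h2⟩ <;> exact ⟨Ne.symm h1, h2.symm⟩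

-- With one oligo the only candidate is j = i = 0, which is skipped: gen 1 = matrix.
theorem pv_gen_one (matrix : List (List Int)) (spectrum : List String) :
    pvAltGen matrix spectrum 1 = matrix := by
  unfold pvAltGen
  simp only [pv_bucket_eq]
  rw [show PySem.List.pyRange 0 1 1 = [0] from by decide]
  simp only [List.filter, List.foldl_cons, List.foldl_nil]
  cases pvPrefixKey (PySem.List.pyGetD spectrum 0 "") ==
      PySem.Str.slice (PySem.List.pyGetD spectrum 0 "") (some 1) none <;> simp

theorem pv_gen_nonpos (matrix : List (List Int)) (spectrum : List String) (b : Int)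
    (h : b ≤ 0) : pvAltGen matrix spectrum b = matrix := by
  unfold pvAltGen
  rw [PySem.List.pyRange_one_eq_nil h]
  rfl

-- ===== VERDICT (by name: the statement is the Claim_ definition above) =====
theorem fill_the_matrix_spec : Claim_equal_fill_the_matrix := by
  intro matrix spectrum n _ hpre
  show fill_the_matrix matrix spectrum n = fill_the_matrix_alt matrix spectrum n
  rw [pv_A_eq_gen]
  show pvAltGen matrix spectrum n = pvAltGen matrix spectrum (min (max n 0) (spectrum.length : Int))
  by_cases hn : n ≤ 0
  · rw [pv_gen_nonpos _ _ _ hn, pv_gen_nonpos]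
    omega
  · rcases hpre with h1 | ⟨hlen, -, -⟩
    · -- n = 1
      have hn1 : n = 1 := by omega
      subst hn1
      by_cases hs : spectrum.length = 0
      · rw [pv_gen_one]
        rw [pv_gen_nonpos]
        omega
      · congr 1
        omega
    · congr 1
      omega
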